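-- pv_equiv track=rewrite | github.com/WT-InfoSec/Route-Cipher | routeCipher.py | addExtraChars
-- ===== SOURCE A (Python) =====
-- def addExtraChars(string, number):
-- 	finalString = string
-- 	alpha = ['a','b','c','d','e','f','g','h','i',
-- 		'j','k','l','m','n','o','p','q','r',
-- 		's','t','u','v','w','x','y','z']
-- 	# range starts at 1 for reverse indexing
-- 	for i in range(1, number+1):
-- 		# add chars reverse alphabetically, rolling if > 26 needed
-- 		finalString += alpha[(i%26)*-1]
-- 	return finalString
-- ===== SOURCE B (Python) =====
-- def addExtraChars(string, number):
-- 	if number <= 0: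
-- 		return string
-- 	cycle = 'zyxwvutsrqponmlkjihgfedcba'
-- 	return string + (cycle * (number // 26 + 1))[:number]
-- ===== Notes on version B (the rewrite author's own statement) =====
-- stated objective: simpler
-- what changed: Replaces the per-character loop with modular negative indexing into an a-z list by a single replicate-and-truncate of the fixed 26-char reverse-alphabet cycle string.
import Mathlib
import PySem

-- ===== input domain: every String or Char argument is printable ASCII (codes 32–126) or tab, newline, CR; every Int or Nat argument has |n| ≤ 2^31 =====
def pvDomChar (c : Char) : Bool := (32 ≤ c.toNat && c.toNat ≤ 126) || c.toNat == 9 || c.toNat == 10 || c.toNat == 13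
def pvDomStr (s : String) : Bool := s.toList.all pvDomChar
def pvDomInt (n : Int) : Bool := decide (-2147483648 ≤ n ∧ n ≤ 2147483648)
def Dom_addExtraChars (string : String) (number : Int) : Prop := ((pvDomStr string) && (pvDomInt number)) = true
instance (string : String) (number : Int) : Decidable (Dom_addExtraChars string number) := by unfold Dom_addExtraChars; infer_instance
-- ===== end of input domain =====

-- B replaces A's per-character reverse-alphabet indexing loop by one replicate-and-truncate of the fixed 26-char cycle (objective: simpler).

-- ===== PORT A =====
def pvAlpha : List Char :=
  ['a','b','c','d','e','f','g','h','i',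
   'j','k','l','m','n','o','p','q','r',
   's','t','u','v','w','x','y','z']

def addExtraChars (string : String) (number : Int) : String :=
  String.ofList ((PySem.List.pyRange 1 (number + 1) 1).foldl
    (fun acc i => acc ++ [PySem.List.pyGetD pvAlpha (PySem.Int.mod i 26 * -1) ' '])
    string.toList)

-- ===== PORT B =====
def pvCycle : List Char := "zyxwvutsrqponmlkjihgfedcba".toList

def addExtraChars_alt (string : String) (number : Int) : String :=
  if number ≤ 0 then string
  else
    String.ofList (string.toList ++
      PySem.List.slice (List.flatten (List.replicate (PySem.Int.floordiv number 26 + 1).toNat pvCycle))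
        none (some number))

-- ===== PRECONDITION & SPEC =====
def Spec_addExtraChars (string : String) (number : Int) (out : String) : Prop := out = addExtraChars_alt string number
instance (string : String) (number : Int) (out : String) : Decidable (Spec_addExtraChars string number out) := by unfold Spec_addExtraChars; infer_instance

-- ===== CLAIM (what is proved, stated in full; the proofs are below) =====
def Claim_equal_addExtraChars : Prop := ∀ (string : String) (number : Int), Dom_addExtraChars string number → Spec_addExtraChars string number (addExtraChars string number)

-- ===== LEMMAS AND PROOFS =====

theorem pvCycle_length : pvCycle.length = 26 := by decide

theorem pvFlat_length (m : Nat) :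
    (List.flatten (List.replicate m pvCycle)).length = 26 * m := by
  induction m with
  | zero => simp
  | succ k ih => simp [List.replicate_succ, ih, pvCycle_length]; ring

theorem pvFlat_get (m j : Nat) (h : j < 26 * m) :
    (List.flatten (List.replicate m pvCycle))[j]? = pvCycle[j % 26]? := by
  induction m generalizing j with
  | zero => omega
  | succ k ih =>
    rw [List.replicate_succ, List.flatten_cons, List.getElem?_append]
    by_cases hj : j < 26
    · rw [if_pos (by simp [pvCycle_length, hj]), Nat.mod_eq_of_lt hj]
    · rw [if_neg (by simp [pvCycle_length]; omega), pvCycle_length,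
        ih (j - 26) (by omega)]
      congr 1
      omega

-- A's indexed character at loop step i = 1 + j equals the cycle character at j % 26.
theorem pvChar_eq (j : Nat) :
    PySem.List.pyGetD pvAlpha (PySem.Int.mod (1 + (j : Int)) 26 * -1) ' ' = pvCycle[j % 26]! := by
  have hlt : j % 26 < 26 := Nat.mod_lt _ (by omega)
  have hmod : PySem.Int.mod (1 + (j : Int)) 26 = (((1 + j) % 26 : Nat) : Int) := by
    rw [show (1 + (j : Int)) = ((1 + j : Nat) : Int) by push_cast; ring]
    exact PySem.Int.mod_natCast _ _
  rw [hmod]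
  have h26 : (1 + j) % 26 = (j % 26 + 1) % 26 := by omega
  rw [h26]
  -- 26 literal cases on the residue
  generalize j % 26 = k at hlt ⊢
  interval_cases k <;> decide

theorem pvPad_eq (n : Nat) :
    (PySem.List.pyRange 1 ((n : Int) + 1) 1).map
        (fun i => PySem.List.pyGetD pvAlpha (PySem.Int.mod i 26 * -1) ' ')
      = (List.flatten (List.replicate (n / 26 + 1) pvCycle)).take n := by
  have hlenL : ((PySem.List.pyRange 1 ((n : Int) + 1) 1).map
      (fun i => PySem.List.pyGetD pvAlpha (PySem.Int.mod i 26 * -1) ' ')).length = n := by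
    simp [PySem.List.length_pyRange_one]
  have hflat : (List.flatten (List.replicate (n / 26 + 1) pvCycle)).length = 26 * (n / 26 + 1) :=
    pvFlat_length _
  have hle : n ≤ 26 * (n / 26 + 1) := by omega
  apply List.ext_getElem?
  intro j
  by_cases hj : j < n
  · rw [List.getElem?_take_of_lt hj,
      pvFlat_get _ j (by omega),
      List.getElem?_map, PySem.List.getElem?_pyRange_one]
    rw [if_pos (by omega)]
    simp only [Option.map_some]
    have := pvChar_eq j
    rw [List.getElem!_eq_getElem?_getD, List.getElem?_eq_getElem (by rw [pvCycle_length]; omega)] at this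
    rw [List.getElem?_eq_getElem (by rw [pvCycle_length]; omega)]
    simpa using this
  · rw [List.getElem?_eq_none (by rw [hlenL]; omega),
      List.getElem?_eq_none (by rw [List.length_take, hflat]; omega)]

-- ===== VERDICT (by name: the statement is the Claim_ definition above) =====
theorem addExtraChars_spec : Claim_equal_addExtraChars := by
  intro string number _
  unfold Spec_addExtraChars addExtraChars addExtraChars_alt
  by_cases hn : number ≤ 0
  · rw [if_pos hn, PySem.List.pyRange_one_eq_nil (by omega)]
    simp
  · rw [if_neg hn]
    have h0 : 0 ≤ number := by omega
    obtain ⟨n, rfl⟩ : ∃ m : Nat, number = (m : Int) := ⟨number.toNat, (Int.toNat_of_nonneg h0).symm⟩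
    rw [PySem.List.foldl_append_singleton_eq_map, PySem.List.slice_to_natCast]
    congr 1
    congr 1
    rw [show PySem.Int.floordiv (n : Int) 26 = ((n / 26 : Nat) : Int) from PySem.Int.floordiv_natCast n 26]
    rw [show ((n / 26 : Nat) : Int) + 1 = ((n / 26 + 1 : Nat) : Int) by push_cast; ring, Int.toNat_natCast]
    exact pvPad_eq n
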